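-- pv_equiv track=rewrite | github.com/Asinski/computer-science | algorithms/search/binary-search.py | right_border
-- ===== SOURCE A (Python) =====
-- def right_border(seq, num):
--     left = -1
--     right = len(seq)
--     while right - left > 1:
--         middle = (left + right) // 2
--         if seq[middle] <= num:
--             left = middle
--         else:
--             right = middle
--
--     return right
-- ===== SOURCE B (Python) =====
-- def right_border(seq, num):
--     # Divide-and-conquer on list slices: recurse on the surviving sub-list with a
--     # base offset instead of moving two absolute border indices over seq.
--     def go(sub, base):
--         if not sub:
--             return base + 1
--         k = (len(sub) + 1) // 2 - 1
--         if sub[k] <= num: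
--             return go(sub[k + 1:], base + k + 1)
--         else:
--             return go(sub[:k], base)
--     return go(list(seq), -1)
-- ===== Notes on version B (the rewrite author's own statement) =====
-- stated objective: alternative
-- what changed: B is a divide-and-conquer recursion on list slices: a helper carries the surviving SUB-LIST plus a base offset and recurses on sub[k+1:] or sub[:k], instead of A's while loop moving two absolute border indices over the fixed list; same probe sequence, so values match on all inputs.
import Mathlib
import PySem

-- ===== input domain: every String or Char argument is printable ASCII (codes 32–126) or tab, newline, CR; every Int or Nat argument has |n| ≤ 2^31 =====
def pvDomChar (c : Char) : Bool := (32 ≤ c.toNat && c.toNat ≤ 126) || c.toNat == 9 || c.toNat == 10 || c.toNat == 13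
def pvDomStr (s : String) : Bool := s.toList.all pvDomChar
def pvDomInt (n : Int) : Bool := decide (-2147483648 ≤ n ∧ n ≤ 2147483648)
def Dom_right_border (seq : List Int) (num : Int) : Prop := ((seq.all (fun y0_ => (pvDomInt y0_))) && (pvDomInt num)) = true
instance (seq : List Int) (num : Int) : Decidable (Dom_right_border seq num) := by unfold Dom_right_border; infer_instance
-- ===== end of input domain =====

-- B replaces A's while loop over two absolute border indices by a divide-and-conquer
-- recursion on list slices (sub-list + base offset); same probes, equal return value.

-- ===== PORT A =====
-- The while loop with state (left, right); middle = (left+right)//2 is written inline.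
-- The Nat argument is fuel that only makes the recursion structural: with the fuel
-- right_border supplies, the 0 branch is never reached (the interval shrinks every
-- iteration), so this computes exactly what A's loop computes. seq[middle] is always
-- in range here, so pyGet? never returns none and the getD 0 default is never used.
def rightBorderLoop (seq : List Int) (num : Int) : Nat → Int → Int → Int
  | 0, _, right => right
  | fuel + 1, left, right =>
    if right - left > 1 then
      if (PySem.List.pyGet? seq (PySem.Int.floordiv (left + right) 2)).getD 0 ≤ num then
        rightBorderLoop seq num fuel (PySem.Int.floordiv (left + right) 2) right
      else
        rightBorderLoop seq num fuel left (PySem.Int.floordiv (left + right) 2)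
    else right

def right_border (seq : List Int) (num : Int) : Int :=
  rightBorderLoop seq num (seq.length + 1) (-1) (seq.length : Int)

-- ===== PORT B =====
-- go(sub, base) of Source B: recursion on the surviving slice of the list;
-- k = (len(sub)+1)//2 - 1 is written inline. The Nat argument is fuel making the
-- recursion structural; with the fuel right_border_alt supplies it never runs out
-- (the slice shrinks every call), so this computes exactly what go computes.
def rbGo (num : Int) : Nat → List Int → Int → Int
  | 0, _, base => base + 1
  | fuel + 1, sub, base =>
    if sub = [] then base + 1
    else
      if (PySem.List.pyGet? sub (PySem.Int.floordiv (PySem.List.len sub + 1) 2 - 1)).getD 0 ≤ num then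
        rbGo num fuel (PySem.List.slice sub (some (PySem.Int.floordiv (PySem.List.len sub + 1) 2 - 1 + 1)) none)
          (base + (PySem.Int.floordiv (PySem.List.len sub + 1) 2 - 1) + 1)
      else
        rbGo num fuel (PySem.List.slice sub none (some (PySem.Int.floordiv (PySem.List.len sub + 1) 2 - 1))) base

def right_border_alt (seq : List Int) (num : Int) : Int :=
  rbGo num (seq.length + 1) seq (-1)

-- ===== PRECONDITION & SPEC =====
def Spec_right_border (seq : List Int) (num : Int) (out : Int) : Prop := out = right_border_alt seq num
instance (seq : List Int) (num : Int) (out : Int) : Decidable (Spec_right_border seq num out) := by unfold Spec_right_border; infer_instance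

-- ===== CLAIM =====
def Claim_equal_right_border : Prop := ∀ (seq : List Int) (num : Int), Dom_right_border seq num → Spec_right_border seq num (right_border seq num)

-- ===== LEMMAS AND PROOFS =====
-- Key invariant: with enough fuel, A's loop on borders (l, r) equals B's recursion on
-- the sub-list seq[l+1:r] with base offset l.
theorem loop_eq_go (seq : List Int) (num : Int) :
    ∀ (n : Nat) (l r : Int), -1 ≤ l → l < r → r ≤ (seq.length : Int) →
      (r - l - 1).toNat ≤ n →
      rightBorderLoop seq num n l r =
        rbGo num n ((seq.drop (l + 1).toNat).take (r - l - 1).toNat) l := by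
  intro n
  induction n with
  | zero =>
    intro l r h0 h1 h2 h
    simp only [rightBorderLoop, rbGo]
    omega
  | succ n ih =>
    intro l r h0 h1 h2 h
    have hlen : ((seq.drop (l + 1).toNat).take (r - l - 1).toNat).length = (r - l - 1).toNat := by
      simp only [List.length_take, List.length_drop]; omega
    rw [rightBorderLoop, rbGo]
    by_cases hc : r - l > 1
    · have hne : (seq.drop (l + 1).toNat).take (r - l - 1).toNat ≠ [] := by
        intro he; rw [he] at hlen; simp at hlen; omega
      rw [if_pos hc, if_neg hne]
      have em : PySem.Int.floordiv (l + r) 2 = (l + r) / 2 :=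
        PySem.Int.floordiv_eq_ediv_of_pos (by omega)
      have ek : PySem.Int.floordiv
            (PySem.List.len ((seq.drop (l + 1).toNat).take (r - l - 1).toNat) + 1) 2
          = (((r - l - 1).toNat : Int) + 1) / 2 := by
        rw [PySem.List.len_eq, hlen]; exact PySem.Int.floordiv_eq_ediv_of_pos (by omega)
      generalize hM : PySem.Int.floordiv (l + r) 2 = M
      generalize hK : PySem.Int.floordiv
          (PySem.List.len ((seq.drop (l + 1).toNat).take (r - l - 1).toNat) + 1) 2 - 1 = K
      have em' : M = (l + r) / 2 := by rw [← hM]; exact em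
      have hK' : K = (((r - l - 1).toNat : Int) + 1) / 2 - 1 := by rw [← hK, ek]
      have hMK : M = l + 1 + K := by omega
      have hK0 : 0 ≤ K := by omega
      have hKm : K < ((r - l - 1).toNat : Int) := by omega
      have hget : PySem.List.pyGet? seq M
          = PySem.List.pyGet? ((seq.drop (l + 1).toNat).take (r - l - 1).toNat) K := by
        rw [PySem.List.pyGet?_of_nonneg seq (by omega),
            PySem.List.pyGet?_of_nonneg _ hK0]
        rw [List.getElem?_take, List.getElem?_drop]
        have h1' : M.toNat = (l + 1).toNat + K.toNat := by omega
        rw [h1']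
        simp only [if_pos (by omega : K.toNat < (r - l - 1).toNat)]
      rw [hget]
      split_ifs with hcmp
      · have hdrop : PySem.List.slice ((seq.drop (l + 1).toNat).take (r - l - 1).toNat)
              (some (K + 1)) none
            = (seq.drop (M + 1).toNat).take (r - M - 1).toNat := by
          rw [PySem.List.slice_from _ (by omega : (0:Int) ≤ K + 1)]
          rw [List.drop_take, List.drop_drop]
          congr 1
          · omega
          · congr 1
            omega
        rw [ih M r (by omega) (by omega) h2 (by omega), hdrop]
        congr 1
        omega
      · have htake : PySem.List.slice ((seq.drop (l + 1).toNat).take (r - l - 1).toNat)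
              none (some K)
            = (seq.drop (l + 1).toNat).take (M - l - 1).toNat := by
          rw [PySem.List.slice_to _ hK0, List.take_take]
          congr 1
          omega
        rw [ih l M h0 (by omega) (by omega) (by omega), htake]
    · have hnil : (seq.drop (l + 1).toNat).take (r - l - 1).toNat = [] := by
        have hz : (r - l - 1).toNat = 0 := by omega
        rw [hz]; simp
      rw [if_neg hc, if_pos hnil]
      omega

-- ===== VERDICT =====
theorem right_border_spec : Claim_equal_right_border := by
  intro seq num _
  unfold Spec_right_border right_border right_border_alt
  by_cases h : seq = []
  · subst h; simp [rightBorderLoop, rbGo]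
  · have h1 : 0 < seq.length := List.length_pos_iff.mpr h
    have hcast : (1 : Int) ≤ (seq.length : Int) := by exact_mod_cast h1
    have key := loop_eq_go seq num (seq.length + 1) (-1) (seq.length : Int)
      (by omega) (by omega) (by omega) (by omega)
    rw [key]
    have hs : (seq.drop ((-1 : Int) + 1).toNat).take ((seq.length : Int) - (-1) - 1).toNat = seq := by
      simp
    rw [hs]
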